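-- pv_equiv track=rewrite | github.com/dinhvan2304/web-scraping-scrapy | Spa/spa_vn/crawl.py | hande_contact
-- ===== SOURCE A (Python) =====
-- def hande_contact(list_contact):
--     dict_contact = dict.fromkeys(['email','web','phone_number'])
--     for method in list_contact:
--         if 'tel:' in method:
--             dict_contact['phone_number'] = method
--         if 'mailto' in method:
--             dict_contact['email'] = method
--         if 'http' in method:
--             dict_contact['web'] = method
--     return dict_contact
-- ===== SOURCE B (Python) =====
-- def hande_contact(list_contact):
--     rev = list(reversed(list_contact))
--     email = next((m for m in rev if 'mailto' in m), None)
--     web = next((m for m in rev if 'http' in m), None)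
--     phone_number = next((m for m in rev if 'tel:' in m), None)
--     return {'email': email, 'web': web, 'phone_number': phone_number}
-- ===== Notes on version B (the rewrite author's own statement) =====
-- stated objective: idiomatic
-- what changed: Replaces the single forward loop that keeps overwriting three dict slots with three independent last-match scans over the reversed list (next(... reversed ...)) and an explicit dict literal.
import Mathlib
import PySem

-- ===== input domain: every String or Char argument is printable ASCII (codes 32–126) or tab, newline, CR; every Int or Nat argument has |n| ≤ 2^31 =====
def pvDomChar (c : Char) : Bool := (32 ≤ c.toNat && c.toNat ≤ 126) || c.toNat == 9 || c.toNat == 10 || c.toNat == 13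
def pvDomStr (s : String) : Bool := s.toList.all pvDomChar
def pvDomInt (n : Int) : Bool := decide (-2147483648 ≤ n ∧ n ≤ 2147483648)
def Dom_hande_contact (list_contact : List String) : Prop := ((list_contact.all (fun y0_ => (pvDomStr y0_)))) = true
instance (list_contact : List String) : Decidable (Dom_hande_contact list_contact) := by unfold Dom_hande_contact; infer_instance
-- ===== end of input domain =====

-- B replaces A's single forward loop over a three-slot dict with three independent
-- last-match scans over the reversed list (idiomatic next(..., None) style); same result.


-- ===== PORT A =====
-- one iteration of A's for-loop (the three successive 'if … in method' updates)
def hcStep (d : PySem.Dict String (Option String)) (method : String) :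
    PySem.Dict String (Option String) :=
  let d := if PySem.Str.isIn "tel:" method then d.insert "phone_number" (some method) else d
  let d := if PySem.Str.isIn "mailto" method then d.insert "email" (some method) else d
  let d := if PySem.Str.isIn "http" method then d.insert "web" (some method) else d
  d

def hande_contact (list_contact : List String) : List (String × Option String) :=
  let dict_contact : PySem.Dict String (Option String) :=
    PySem.Dict.ofList [("email", none), ("web", none), ("phone_number", none)]
  let dict_contact := list_contact.foldl hcStep dict_contact
  dict_contact.items

-- ===== PORT B =====
def hande_contact_alt (list_contact : List String) : List (String × Option String) :=
  let rev := list_contact.reverse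
  let email := rev.find? (fun m => PySem.Str.isIn "mailto" m)
  let web := rev.find? (fun m => PySem.Str.isIn "http" m)
  let phone_number := rev.find? (fun m => PySem.Str.isIn "tel:" m)
  [("email", email), ("web", web), ("phone_number", phone_number)]

-- ===== PRECONDITION & SPEC =====
def Spec_hande_contact (list_contact : List String) (out : List (String × Option String)) : Prop := out = hande_contact_alt list_contact
instance (list_contact : List String) (out : List (String × Option String)) : Decidable (Spec_hande_contact list_contact out) := by unfold Spec_hande_contact; infer_instance

-- ===== CLAIM (what is proved, stated in full; the proofs are below) =====
def Claim_equal_hande_contact : Prop := ∀ (list_contact : List String), Dom_hande_contact list_contact → Spec_hande_contact list_contact (hande_contact list_contact)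

-- ===== LEMMAS AND PROOFS =====

/-- Inserting at one of the three literal keys keeps the dict in its three-key shape. -/
lemma insert_phone (e w p v : Option String) :
    (PySem.Dict.mk [("email", e), ("web", w), ("phone_number", p)]).insert "phone_number" v
    = PySem.Dict.mk [("email", e), ("web", w), ("phone_number", v)] := by
  apply PySem.Dict.ext
  simp [PySem.Dict.items_insert, PySem.Dict.contains_mk]

lemma insert_email (e w p v : Option String) :
    (PySem.Dict.mk [("email", e), ("web", w), ("phone_number", p)]).insert "email" v
    = PySem.Dict.mk [("email", v), ("web", w), ("phone_number", p)] := by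
  apply PySem.Dict.ext
  simp [PySem.Dict.items_insert, PySem.Dict.contains_mk]

lemma insert_web (e w p v : Option String) :
    (PySem.Dict.mk [("email", e), ("web", w), ("phone_number", p)]).insert "web" v
    = PySem.Dict.mk [("email", e), ("web", v), ("phone_number", p)] := by
  apply PySem.Dict.ext
  simp [PySem.Dict.items_insert, PySem.Dict.contains_mk]

/-- A's loop step on the literal three-key dict, slotwise. -/
lemma step_shape (e w p : Option String) (method : String) :
    hcStep (PySem.Dict.mk [("email", e), ("web", w), ("phone_number", p)]) method
    = PySem.Dict.mk [("email", if PySem.Str.isIn "mailto" method then some method else e),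
                     ("web", if PySem.Str.isIn "http" method then some method else w),
                     ("phone_number", if PySem.Str.isIn "tel:" method then some method else p)] := by
  unfold hcStep
  split_ifs <;> simp_all [insert_phone, insert_email, insert_web]

/-- `o.elim none some` is the identity on options. -/
lemma elim_id (o : Option String) : o.elim none some = o := by cases o <;> rfl

/-- The fallback update of one slot, as a reverse `find?` with default. -/
lemma slot_step (pred : String → Bool) (x : String) (t : List String) (dflt : Option String) :
    ((x :: t).reverse.find? pred).elim dflt some
    = (t.reverse.find? pred).elim (if pred x then some x else dflt) some := by
  simp only [List.reverse_cons, List.find?_append]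
  cases h : t.reverse.find? pred <;> cases hx : pred x <;> simp [hx]

/-- Fold invariant: folding A's step from the literal dict yields the three last-match values,
    with the accumulator entries as fallbacks. -/
lemma fold_inv (l : List String) (e w p : Option String) :
    l.foldl hcStep (PySem.Dict.mk [("email", e), ("web", w), ("phone_number", p)])
    = PySem.Dict.mk
        [("email", (l.reverse.find? (fun m => PySem.Str.isIn "mailto" m)).elim e some),
         ("web", (l.reverse.find? (fun m => PySem.Str.isIn "http" m)).elim w some),
         ("phone_number", (l.reverse.find? (fun m => PySem.Str.isIn "tel:" m)).elim p some)] := by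
  induction l generalizing e w p with
  | nil => simp
  | cons x t ih =>
    rw [List.foldl_cons, step_shape, ih,
        slot_step (fun m => PySem.Str.isIn "mailto" m) x t e,
        slot_step (fun m => PySem.Str.isIn "http" m) x t w,
        slot_step (fun m => PySem.Str.isIn "tel:" m) x t p]

-- ===== VERDICT (by name: the statement is the Claim_ definition above) =====
theorem hande_contact_spec : Claim_equal_hande_contact := by
  intro l _
  show hande_contact l = hande_contact_alt l
  have hA : hande_contact l
      = (l.foldl hcStep (PySem.Dict.mk
          [("email", none), ("web", none), ("phone_number", none)])).items := rfl
  rw [hA, fold_inv]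
  unfold hande_contact_alt
  simp only [elim_id]
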